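-- pv_equiv track=rewrite | github.com/andylehti/canonical-order | calculator.py | nestEx
-- ===== SOURCE A (Python) =====
-- def nestEx(e):
--     """
--     Find the innermost parentheses in the expression.
--     Returns the start and end indices of the innermost pair.
--     """
--     s = []
--     for i, c in enumerate(e):
--         if c == '(':
--             s.append(i)
--         elif c == ')':
--             if s:
--                 return s.pop(), i
--             else:
--                 return -1, -1
--     return -1, -1
-- ===== SOURCE B (Python) =====
-- def nestEx(e):
--     """
--     Find the innermost parentheses in the expression.
--     Returns the start and end indices of the innermost pair.
--     """
--     j = e.find(')')
--     if j == -1: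
--         return -1, -1
--     i = e.rfind('(', 0, j)
--     return (i, j) if i != -1 else (-1, -1)
-- ===== Notes on version B (the rewrite author's own statement) =====
-- stated objective: faster
-- what changed: Replaces the explicit enumerate-loop with a pushed index stack by two built-in string searches: the first closing paren forward, then the matching open paren backward before it.
import Mathlib
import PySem

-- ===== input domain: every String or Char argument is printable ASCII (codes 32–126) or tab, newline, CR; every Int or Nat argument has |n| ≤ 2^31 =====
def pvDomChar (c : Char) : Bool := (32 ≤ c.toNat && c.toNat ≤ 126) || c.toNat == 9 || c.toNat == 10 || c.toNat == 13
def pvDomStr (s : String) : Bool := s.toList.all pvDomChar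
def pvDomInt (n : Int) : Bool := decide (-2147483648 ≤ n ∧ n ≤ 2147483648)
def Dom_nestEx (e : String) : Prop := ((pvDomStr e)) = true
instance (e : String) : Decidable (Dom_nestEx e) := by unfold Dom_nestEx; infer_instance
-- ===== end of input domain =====

-- B replaces A's character loop with a pushed index stack by two built-in string
-- searches (first closing paren forward, matching open paren backward before it).

-- ===== PORT A =====
-- the enumerate-loop: index i, stack s of pushed '(' indices (top = head)
def nestExLoop : List Char → Int → List Int → Int × Int
  | [], _, _ => (-1, -1)
  | c :: rest, i, s =>
    if c = '(' then nestExLoop rest (i + 1) (i :: s)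
    else if c = ')' then
      match s with
      | top :: _ => (top, i)
      | [] => (-1, -1)
    else nestExLoop rest (i + 1) s

def nestEx (e : String) : Int × Int := nestExLoop e.toList 0 []

-- ===== PORT B =====
def nestEx_alt (e : String) : Int × Int :=
  let j := PySem.Str.find e ")"
  if j = -1 then (-1, -1)
  else
    let i := PySem.Str.rfindFrom e "(" 0 (some j)
    if i ≠ -1 then (i, j) else (-1, -1)

-- ===== PRECONDITION & SPEC =====
def Spec_nestEx (e : String) (out : Int × Int) : Prop := out = nestEx_alt e
instance (e : String) (out : Int × Int) : Decidable (Spec_nestEx e out) := by unfold Spec_nestEx; infer_instance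

-- ===== CLAIM (what is proved, stated in full; the proofs are below) =====
def Claim_equal_nestEx : Prop := ∀ (e : String), Dom_nestEx e → Spec_nestEx e (nestEx e)

-- ===== LEMMAS AND PROOFS =====

-- the loop only ever inspects the head of the stack
def nestExOpt : List Char → Int → Option Int → Int × Int
  | [], _, _ => (-1, -1)
  | c :: rest, i, t =>
    if c = '(' then nestExOpt rest (i + 1) (some i)
    else if c = ')' then
      match t with
      | some v => (v, i)
      | none => (-1, -1)
    else nestExOpt rest (i + 1) t

lemma loop_eq_opt : ∀ (cs : List Char) (i : Int) (s : List Int),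
    nestExLoop cs i s = nestExOpt cs i s.head? := by
  intro cs
  induction cs with
  | nil => intro i s; rfl
  | cons c rest ih =>
    intro i s
    simp only [nestExLoop, nestExOpt]
    split_ifs with h1 h2
    · exact ih (i + 1) (i :: s)
    · cases s <;> rfl
    · exact ih (i + 1) s

-- last index of character c in a list, -1 if absent (cons-recursive)
def lastIdx (c : Char) : List Char → Int
  | [] => -1
  | a :: r =>
    let p := lastIdx c r
    if p = -1 then (if a = c then 0 else -1) else p + 1

lemma lastIdx_concat (c a : Char) (t : List Char) :
    lastIdx c (t ++ [a]) = if a = c then (t.length : Int) else lastIdx c t := by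
  induction t with
  | nil => simp [lastIdx]
  | cons b t ih =>
    simp only [List.cons_append, lastIdx, ih, List.length_cons]
    split_ifs with h h2 h3 <;> simp_all <;> omega

lemma single_isPrefixOf (c : Char) (l : List Char) :
    [c].isPrefixOf l = true ↔ l.head? = some c := by
  rw [List.isPrefixOf_iff_prefix]
  cases l with
  | nil => simp
  | cons a r => simp [List.cons_prefix_cons, eq_comm]

lemma lastIdx_ge (c : Char) (t : List Char) : -1 ≤ lastIdx c t := by
  induction t with
  | nil => simp [lastIdx]
  | cons a r ih =>
    simp only [lastIdx]
    split_ifs <;> omega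

lemma rfind_go_single (t : List Char) (c : Char) :
    ∀ k : Nat, PySem.Chars.rfind.go t [c] k = lastIdx c (t.take (k + 1)) := by
  intro k
  induction k with
  | zero =>
    show (if [c].isPrefixOf t = true then 0 else -1) = lastIdx c (t.take 1)
    cases t with
    | nil => simp [lastIdx]
    | cons a r =>
      by_cases h : a = c
      · simp [single_isPrefixOf, h, lastIdx]
      · have : ¬ [c].isPrefixOf (a :: r) = true := by
          simp [single_isPrefixOf]; exact fun hh => h hh.symm
        simp [this, lastIdx, h]
  | succ k ih =>
    show (if [c].isPrefixOf (t.drop (k + 1)) = true then ((k : Int) + 1) else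
        PySem.Chars.rfind.go t [c] k) = lastIdx c (t.take (k + 2))
    by_cases hk : k + 1 < t.length
    · have htake : t.take (k + 2) = t.take (k + 1) ++ [t[k+1]] := by
        rw [List.take_succ, List.getElem?_eq_getElem hk]; rfl
      have hdrop : (t.drop (k + 1)).head? = some t[k+1] := by
        rw [List.head?_drop, List.getElem?_eq_getElem hk]
      rw [htake, lastIdx_concat]
      by_cases hc : t[k+1] = c
      · have : [c].isPrefixOf (t.drop (k + 1)) = true := by
          rw [single_isPrefixOf, hdrop, hc]
        simp [this, hc, List.length_take, Nat.min_eq_left (by omega : k + 1 ≤ t.length)]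
      · have : ¬ [c].isPrefixOf (t.drop (k + 1)) = true := by
          rw [single_isPrefixOf, hdrop]; exact fun hh => hc (by injection hh)
        simp [this, hc, ih]
    · have hdrop : t.drop (k + 1) = [] := List.drop_eq_nil_of_le (by omega)
      have h1 : t.take (k + 2) = t := List.take_of_length_le (by omega)
      have h2 : t.take (k + 1) = t := List.take_of_length_le (by omega)
      simp [hdrop, List.isPrefixOf, ih, h1, h2]

lemma rfind_single (t : List Char) (c : Char) :
    PySem.Chars.rfind t [c] = lastIdx c t := by
  show PySem.Chars.rfind.go t [c] t.length = _
  cases t with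
  | nil => simp [rfind_go_single, lastIdx]
  | cons a r =>
    rw [rfind_go_single]
    congr 1
    exact List.take_of_length_le (by simp)

-- first-occurrence search: cons unfolding for single-character find
lemma find_go_shift (c : Char) : ∀ (t : List Char) (k : Nat),
    PySem.Chars.find.go [c] t (k + 1) =
      (if PySem.Chars.find.go [c] t k = -1 then -1 else PySem.Chars.find.go [c] t k + 1) := by
  intro t
  induction t with
  | nil => intro k; simp [PySem.Chars.find.go, List.isEmpty]
  | cons a r ih =>
    intro k
    show (if [c].isPrefixOf (a :: r) = true then ((k : Int) + 1) else PySem.Chars.find.go [c] r (k + 2))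
        = if (if [c].isPrefixOf (a :: r) = true then (k : Int) else PySem.Chars.find.go [c] r (k + 1)) = -1
          then -1
          else (if [c].isPrefixOf (a :: r) = true then (k : Int) else PySem.Chars.find.go [c] r (k + 1)) + 1
    by_cases h : [c].isPrefixOf (a :: r) = true
    · simp [h] <;> omega
    · simp [h, ih (k + 1)]

lemma find_cons (c a : Char) (r : List Char) :
    PySem.Chars.find (a :: r) [c] =
      if a = c then 0
      else if PySem.Chars.find r [c] = -1 then -1 else PySem.Chars.find r [c] + 1 := by
  show PySem.Chars.find.go [c] (a :: r) 0 = _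
  by_cases h : a = c
  · have : [c].isPrefixOf (a :: r) = true := by rw [single_isPrefixOf]; simp [h]
    simp [PySem.Chars.find.go, this, h]
  · have hp : ¬ [c].isPrefixOf (a :: r) = true := by
      rw [single_isPrefixOf]; exact fun hh => h (by injection hh)
    show (if [c].isPrefixOf (a :: r) = true then (0 : Int) else PySem.Chars.find.go [c] r 1) = _
    simp only [hp, if_false, h]
    exact find_go_shift c r 0

-- main characterisation of the loop in terms of find / lastIdx
lemma opt_eq_search : ∀ (cs : List Char) (i : Int) (t : Option Int),
    nestExOpt cs i t =
      (let j := PySem.Chars.find cs [')']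
       if j = -1 then (-1, -1)
       else
         let p := lastIdx '(' (cs.take j.toNat)
         if p = -1 then
           (match t with | some v => (v, i + j) | none => (-1, -1))
         else (i + p, i + j)) := by
  intro cs
  induction cs with
  | nil => intro i t; simp [nestExOpt, PySem.Chars.find, PySem.Chars.find.go, List.isEmpty]
  | cons c rest ih =>
    intro i t
    have hge : ∀ s sub, PySem.Chars.find s sub ≠ -1 → 0 ≤ PySem.Chars.find s sub := by
      intro s sub h
      have := PySem.Chars.neg_one_le_find s sub
      omega
    by_cases hc : c = ')'
    · subst hc
      simp only [nestExOpt, if_neg (by decide : ¬ (')' = '(')), if_pos rfl,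
        find_cons, if_pos rfl]
      cases t <;> simp [lastIdx]
    · have hfc := find_cons ')' c rest
      rw [if_neg hc] at hfc
      by_cases hfr : PySem.Chars.find rest [')'] = -1
      · -- no ')' anywhere
        rw [if_pos hfr] at hfc
        by_cases ho : c = '('
        · simp only [nestExOpt, if_pos ho, ih, hfr, hfc]; simp
        · simp only [nestExOpt, if_neg ho, if_neg hc, ih, hfr, hfc]; simp
      · rw [if_neg hfr] at hfc
        have h0 : 0 ≤ PySem.Chars.find rest [')'] := hge _ _ hfr
        set fr := PySem.Chars.find rest [')'] with hfr_def
        have hne : fr + 1 ≠ -1 := by omega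
        have htn : (fr + 1).toNat = fr.toNat + 1 := by omega
        have htake : (c :: rest).take ((fr + 1).toNat) = c :: rest.take fr.toNat := by
          rw [htn]; rfl
        have hpge := lastIdx_ge '(' (rest.take fr.toNat)
        by_cases ho : c = '('
        · subst ho
          simp only [nestExOpt, if_pos rfl, ih, hfc, if_neg hne, htake]
          simp only [lastIdx]
          by_cases hp : lastIdx '(' (rest.take fr.toNat) = -1
          · simp only [hp, if_pos rfl, if_neg hfr, Prod.mk.injEq]
            simp
            omega
          · have hpne : lastIdx '(' (rest.take fr.toNat) + 1 ≠ -1 := by omega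
            simp [hp, hpne, if_neg hfr]
            omega
        · have hcc : ¬ (c = '(') := ho
          simp only [nestExOpt, if_neg ho, if_neg hc, ih, hfc, if_neg hne, htake]
          simp only [lastIdx, hcc, if_false]
          by_cases hp : lastIdx '(' (rest.take fr.toNat) = -1
          · simp only [hp, if_pos rfl, if_neg hfr]
            cases t <;> simp <;> omega
          · have hpne : lastIdx '(' (rest.take fr.toNat) + 1 ≠ -1 := by omega
            simp [hp, hpne, if_neg hfr]
            omega

-- unfolding of B's rfindFrom call for 0 ≤ j ≤ length
lemma rfindFrom_zero_to (cs : List Char) (j : Int) (h0 : 0 ≤ j) (hle : j ≤ (cs.length : Int)) :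
    PySem.Chars.rfindFrom cs ['('] 0 (some j) =
      (let r := lastIdx '(' (cs.take j.toNat)
       if r = -1 then -1 else r) := by
  unfold PySem.Chars.rfindFrom
  have h1 : ¬ ((cs.length : Int) < j) := by omega
  have h2 : ¬ (j < (0 : Int)) := by omega
  simp only [h1, if_false, h2, lt_irrefl, Int.toNat_zero, List.drop_zero,
    rfind_single]
  have h3 : ¬ (j < (0 : Int)) := h2
  split_ifs with hlt <;> simp_all <;> omega

-- ===== VERDICT (by name: the statement is the Claim_ definition above) =====
theorem nestEx_spec : Claim_equal_nestEx := by
  intro e _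
  unfold Spec_nestEx nestEx nestEx_alt
  rw [loop_eq_opt, List.head?_nil, opt_eq_search]
  have hfind : PySem.Str.find e ")" = PySem.Chars.find e.toList [')'] := rfl
  have hrf : PySem.Str.rfindFrom e "(" 0 (some (PySem.Chars.find e.toList [')'])) =
      PySem.Chars.rfindFrom e.toList ['('] 0 (some (PySem.Chars.find e.toList [')'])) := rfl
  simp only [hfind, hrf]
  by_cases hj : PySem.Chars.find e.toList [')'] = -1
  · simp [hj]
  · have h0 : 0 ≤ PySem.Chars.find e.toList [')'] := by
      have := PySem.Chars.neg_one_le_find e.toList [')']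
      omega
    have hle := PySem.Chars.find_le_length e.toList [')']
    rw [rfindFrom_zero_to _ _ h0 hle]
    by_cases hp : lastIdx '(' (e.toList.take (PySem.Chars.find e.toList [')']).toNat) = -1
    · simp [hj, hp]
    · simp [hj, hp]
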